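-- pv_equiv track=rewrite | github.com/SamuelMiller413/Python-101- | 12_user-input-string-formatting/Game_Smirkwood.py | funny_name
-- ===== SOURCE A (Python) =====
-- def funny_name(name):
--     prefix = "Schl"
--     rhyme_name = ""
--
--     found_vowel = False
--     for i in name:
--         if i in 'aeiouyAEIOUY':
--             found_vowel = True
--         if found_vowel == True:
--             rhyme_name += str.lower(i)
--     return prefix + rhyme_name
-- ===== SOURCE B (Python) =====
-- def funny_name(name):
--     idx = next((i for i, c in enumerate(name) if c in 'aeiouyAEIOUY'), len(name))
--     return 'Schl' + name[idx:].lower()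
-- ===== Notes on version B (the rewrite author's own statement) =====
-- stated objective: faster
-- what changed: Replaces the char-by-char flag-and-accumulate loop (repeated string concatenation) with locating the first vowel's index and returning the prefix plus the lowered tail slice in one bulk operation.
import Mathlib
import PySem

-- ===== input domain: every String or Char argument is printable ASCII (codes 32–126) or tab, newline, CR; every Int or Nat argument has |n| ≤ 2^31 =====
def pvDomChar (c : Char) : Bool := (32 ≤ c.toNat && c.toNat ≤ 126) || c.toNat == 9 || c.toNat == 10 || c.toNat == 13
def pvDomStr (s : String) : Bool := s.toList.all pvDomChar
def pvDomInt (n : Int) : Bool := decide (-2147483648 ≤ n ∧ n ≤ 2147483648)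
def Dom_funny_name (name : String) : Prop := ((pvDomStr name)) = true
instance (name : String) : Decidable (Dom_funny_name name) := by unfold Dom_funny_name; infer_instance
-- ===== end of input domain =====

-- B replaces A's char-by-char flag-and-accumulate loop by locating the first vowel's
-- index and returning "Schl" plus the lowered tail slice done in bulk (objective: faster, measured).

-- ===== PORT A =====
-- the membership test `i in 'aeiouyAEIOUY'` (shared by both ports)
def pvVowel (c : Char) : Bool := "aeiouyAEIOUY".toList.contains c

-- A's loop body: state = (found_vowel, rhyme_name as a char list)
def pvStep : Bool × List Char → Char → Bool × List Char :=
  fun st i =>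
    let found := if pvVowel i then true else st.1
    (found, if found then st.2 ++ [PySem.Chars.lowerChar i] else st.2)

def funny_name (name : String) : String :=
  let st := name.toList.foldl pvStep (false, [])
  "Schl" ++ String.ofList st.2

-- ===== PORT B =====
-- idx = first index of a vowel (length if none); name[idx:] with idx ≥ 0 is `drop idx` (exact)
def funny_name_alt (name : String) : String :=
  let idx := name.toList.findIdx pvVowel
  "Schl" ++ PySem.Str.lower (String.ofList (name.toList.drop idx))

-- ===== PRECONDITION & SPEC =====
def Spec_funny_name (name : String) (out : String) : Prop := out = funny_name_alt name
instance (name : String) (out : String) : Decidable (Spec_funny_name name out) := by unfold Spec_funny_name; infer_instance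

-- ===== CLAIM (what is proved, stated in full; the proofs are below) =====
def Claim_equal_funny_name : Prop := ∀ (name : String), Dom_funny_name name → Spec_funny_name name (funny_name name)

-- ===== LEMMAS AND PROOFS =====

theorem pvLoop_true (l : List Char) (acc : List Char) :
    l.foldl pvStep (true, acc) = (true, acc ++ l.map PySem.Chars.lowerChar) := by
  induction l generalizing acc with
  | nil => simp
  | cons c t ih =>
    simp only [List.foldl_cons]
    have hstep : pvStep (true, acc) c = (true, acc ++ [PySem.Chars.lowerChar c]) := by
      unfold pvStep; split <;> simp
    rw [hstep, ih]
    simp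

theorem pvLoop_false (l : List Char) :
    (l.foldl pvStep (false, [])).2 = (l.drop (l.findIdx pvVowel)).map PySem.Chars.lowerChar := by
  induction l with
  | nil => simp
  | cons c t ih =>
    simp only [List.foldl_cons]
    by_cases h : pvVowel c = true
    · have hstep : pvStep (false, []) c = (true, [PySem.Chars.lowerChar c]) := by
        unfold pvStep; rw [h]; rfl
      rw [hstep, pvLoop_true, List.findIdx_cons, h]
      simp
    · have hb : pvVowel c = false := by simpa using h
      have hstep : pvStep (false, []) c = (false, []) := by
        unfold pvStep; rw [hb]; rfl
      rw [hstep, List.findIdx_cons, hb, ih]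
      simp

theorem pvOfList_map_lower (xs : List Char) :
    String.ofList (List.map PySem.Chars.lowerChar xs) = PySem.Str.lower (String.ofList xs) := by
  apply String.ext
  simp [PySem.Str.lower, PySem.Chars.lower]

-- ===== VERDICT (by name: the statement is the Claim_ definition above) =====
theorem funny_name_spec : Claim_equal_funny_name := by
  intro name _
  show _ = _
  simp only [funny_name, funny_name_alt]
  rw [pvLoop_false, pvOfList_map_lower]
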